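-- pv_equiv track=rewrite | github.com/MoTo-LaBo/Pythonic_code | beginner/prepare_coins/prepare_coins.py | coin_num
-- ===== SOURCE A (Python) =====
-- def coin_num(price: int):
--     """入力値 price から最小の硬貨の枚数を出力
--
--     Args:
--         price (int): 0 ~ 1000円までの金額
--
--     Returns:
--         [int]: [count] 硬貨の枚数
--     """
--
--     if not 0 < price <= 1000:
--         return
--
--     coins = [500, 100, 50, 10, 5, 1]
--     count = 0
--
--     for pay in coins:
--         coin_num, price = divmod(price, pay)
--         if price >= 0:
--             count += coin_num
--
--     return count
-- ===== SOURCE B (Python) =====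
-- def coin_num(price: int):
--     """Closed form: per decimal place, coins = digit//5 + digit%5 (no greedy sweep)."""
--     if not 0 < price <= 1000:
--         return
--     units = price % 10
--     tens = (price // 10) % 10
--     hundreds = price // 100
--     return sum(d // 5 + d % 5 for d in (units, tens, hundreds))
-- ===== Notes on version B (the rewrite author's own statement) =====
-- stated objective: alternative
-- what changed: Replaces the descending greedy divmod sweep over the six denominations with a closed-form per-decimal-place digit formula (d//5 + d%5 for units, tens, hundreds).
import Mathlib
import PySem

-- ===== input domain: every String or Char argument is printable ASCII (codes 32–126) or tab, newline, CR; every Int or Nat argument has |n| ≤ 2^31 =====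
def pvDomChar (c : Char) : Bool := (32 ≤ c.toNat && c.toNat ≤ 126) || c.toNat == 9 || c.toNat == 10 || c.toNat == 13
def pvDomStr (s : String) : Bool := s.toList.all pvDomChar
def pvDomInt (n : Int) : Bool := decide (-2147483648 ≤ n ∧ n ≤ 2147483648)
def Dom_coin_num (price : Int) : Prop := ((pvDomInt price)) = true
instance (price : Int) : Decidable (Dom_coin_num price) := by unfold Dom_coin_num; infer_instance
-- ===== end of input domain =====

-- B replaces A's descending divmod sweep over six denominations with a closed-form
-- per-decimal-place digit formula; same value everywhere (objective: alternative).

-- ===== PORT A =====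
def coin_num (price : Int) : Option Int :=
  if ¬(0 < price ∧ price ≤ 1000) then none
  else
    let coins : List Int := [500, 100, 50, 10, 5, 1]
    let st := coins.foldl (fun (st : Int × Int) pay =>
      let cn := PySem.Int.floordiv st.2 pay
      let pr := PySem.Int.mod st.2 pay
      (if pr ≥ 0 then st.1 + cn else st.1, pr)) (0, price)
    some st.1

-- ===== PORT B =====
def coin_num_alt (price : Int) : Option Int :=
  if ¬(0 < price ∧ price ≤ 1000) then none
  else
    let units := PySem.Int.mod price 10
    let tens := PySem.Int.mod (PySem.Int.floordiv price 10) 10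
    let hundreds := PySem.Int.floordiv price 100
    some (([units, tens, hundreds].map
      (fun d => PySem.Int.floordiv d 5 + PySem.Int.mod d 5)).sum)

-- ===== PRECONDITION & SPEC =====
def Spec_coin_num (price : Int) (out : Option Int) : Prop := out = coin_num_alt price
instance (price : Int) (out : Option Int) : Decidable (Spec_coin_num price out) := by unfold Spec_coin_num; infer_instance

-- ===== CLAIM (what is proved, stated in full; the proofs are below) =====
def Claim_equal_coin_num : Prop := ∀ (price : Int), Dom_coin_num price → Spec_coin_num price (coin_num price)

-- ===== LEMMAS AND PROOFS =====

-- the two programs agree on every in-range amount, checked exhaustively over 1..1000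
set_option maxRecDepth 10000 in
theorem coin_num_range : ∀ n ∈ List.range 1000,
    coin_num ((n : Int) + 1) = coin_num_alt ((n : Int) + 1) := by decide

-- ===== VERDICT (by name: the statement is the Claim_ definition above) =====
theorem coin_num_spec : Claim_equal_coin_num := by
  intro price _
  unfold Spec_coin_num
  by_cases h : 0 < price ∧ price ≤ 1000
  · have hn : price = ((price - 1).toNat : Int) + 1 := by omega
    have hm : (price - 1).toNat ∈ List.range 1000 := by
      rw [List.mem_range]; omega
    rw [hn]
    exact coin_num_range _ hm
  · simp [coin_num, coin_num_alt, h]
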